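-- pv_equiv track=rewrite | github.com/VirtualGojira/Capstone | netsquid/t3.1 old.py | bytes_to_bases
-- ===== SOURCE A (Python) =====
-- def bytes_to_bases(byte_stream, num_bits):
--     bits = []
--     for byte in byte_stream:
--         for i in range(8):
--             bits.append((byte >> (7 - i)) & 1)
--             if len(bits) == num_bits:
--                 break
--         if len(bits) == num_bits:
--             break
--     return ['Z' if bit == 0 else 'X' for bit in bits]
-- ===== SOURCE B (Python) =====
-- def bytes_to_bases(byte_stream, num_bits):
--     data = list(byte_stream)
--     total = min(num_bits, 8 * len(data))
--     return ['Z' if (data[j // 8] >> (7 - j % 8)) & 1 == 0 else 'X'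
--             for j in range(total)]
-- ===== Notes on version B (the rewrite author's own statement) =====
-- stated objective: alternative
-- what changed: Instead of streaming bytes and accumulating a bit list with early breaks, B is demand-driven: it computes the output length total = min(num_bits, 8*len) up front and derives each label directly from its output index j by random access (data[j//8] >> (7 - j%8)) & 1, building no intermediate bit list.
-- intended difference: On num_bits = 0 with a nonempty stream A's break test len(bits)==num_bits can never fire (the length is already 1 at the first test), so A ignores the limit and returns all 8*len labels, while B returns [], the intended value when zero bits are requested. — e.g. on bytes_to_bases([1], 0): A returns ["Z", "Z", "Z", "Z", "Z", "Z", "Z", "X"], B returns []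
-- outside the precondition, e.g. on bytes_to_bases([-1], -5): A returns ['X', 'X', 'X', 'X', 'X', 'X', 'X', 'X'], B returns []
import Mathlib
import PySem

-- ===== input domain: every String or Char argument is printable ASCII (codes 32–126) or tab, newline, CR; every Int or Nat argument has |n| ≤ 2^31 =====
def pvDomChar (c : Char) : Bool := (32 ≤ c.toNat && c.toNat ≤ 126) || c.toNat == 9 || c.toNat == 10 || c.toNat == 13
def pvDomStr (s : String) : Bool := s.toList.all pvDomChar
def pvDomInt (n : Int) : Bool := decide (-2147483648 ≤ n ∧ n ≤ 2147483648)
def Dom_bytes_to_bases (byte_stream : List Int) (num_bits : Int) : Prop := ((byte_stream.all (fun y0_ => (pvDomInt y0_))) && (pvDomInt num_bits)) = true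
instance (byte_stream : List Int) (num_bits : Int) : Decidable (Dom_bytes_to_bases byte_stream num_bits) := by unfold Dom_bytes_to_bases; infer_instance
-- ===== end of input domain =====

-- B is demand-driven: it computes the output length up front and derives each label directly
-- from its output index j by random access (data[j // 8] >> (7 - j % 8)) & 1, building no
-- intermediate bit list (alternative decomposition, not faster); on num_bits = 0 with a
-- nonempty stream the two differ intentionally (see D_ below).

-- ===== PORT A =====
-- bits.append((byte >> (7 - i)) & 1)
def pvBitA (byte : Int) (i : Nat) : Int := PySem.Int.band (byte >>> (7 - i)) 1

-- one step of the inner 'for i in range(8)' loop, with a break flag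
def pvInnerStep (byte num_bits : Int) (st : List Int × Bool) (i : Nat) : List Int × Bool :=
  if st.2 then st
  else
    let bits' := st.1 ++ [pvBitA byte i]
    if (bits'.length : Int) = num_bits then (bits', true) else (bits', false)

-- the inner loop: for i in range(8): append; if len(bits) == num_bits: break
def pvInner (byte num_bits : Int) (bits : List Int) : List Int × Bool :=
  (List.range 8).foldl (pvInnerStep byte num_bits) (bits, false)

-- the outer loop: for byte in byte_stream: …inner…; if len(bits) == num_bits: break
def pvOuter (num_bits : Int) : List Int → List Int → List Int
  | bits, [] => bits
  | bits, byte :: rest =>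
    let bits' := (pvInner byte num_bits bits).1
    if (bits'.length : Int) = num_bits then bits' else pvOuter num_bits bits' rest

def bytes_to_bases (byte_stream : List Int) (num_bits : Int) : List String :=
  let bits := pvOuter num_bits [] byte_stream
  bits.map (fun bit => if bit = 0 then "Z" else "X")

-- ===== PORT B =====
-- 'Z' if (data[j // 8] >> (7 - j % 8)) & 1 == 0 else 'X'; for j in range(total) the index
-- j // 8 is in range (pyGetD default never used) and 7 - j % 8 is ≥ 0, so .toNat is exact.
def bytes_to_bases_alt (byte_stream : List Int) (num_bits : Int) : List String :=
  let data := byte_stream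
  let total := min num_bits (8 * (data.length : Int))
  (PySem.List.pyRange 0 total 1).map (fun j =>
    if PySem.Int.band
         ((PySem.List.pyGetD data (PySem.Int.floordiv j 8) 0)
            >>> (7 - PySem.Int.mod j 8).toNat) 1 = 0
    then "Z" else "X")

-- ===== PRECONDITION & SPEC =====
-- Pre_ excludes negative num_bits, a meaningless bit count on which A's break test never fires
-- (so A accidentally returns all bits) while B requests min(num_bits, 8·len) < 0 bits, i.e.
-- none — neither value is specified, so these inputs are excluded.
def Pre_bytes_to_bases (byte_stream : List Int) (num_bits : Int) : Prop := 0 ≤ num_bits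
instance (byte_stream : List Int) (num_bits : Int) : Decidable (Pre_bytes_to_bases byte_stream num_bits) := by unfold Pre_bytes_to_bases; infer_instance
def pvWitness_bytes_to_bases : List Int × Int := ([1, 255], 5)

-- On num_bits = 0 with a nonempty stream A's break test len(bits)==num_bits can never fire
-- (the length is already 1 at the first test), so A ignores the limit and returns all 8·len
-- labels, while B returns [] — the intended value when zero bits are requested.
def D_bytes_to_bases (byte_stream : List Int) (num_bits : Int) : Prop :=
  num_bits = 0 ∧ byte_stream ≠ []
instance (byte_stream : List Int) (num_bits : Int) : Decidable (D_bytes_to_bases byte_stream num_bits) := by unfold D_bytes_to_bases; infer_instance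

def Spec_bytes_to_bases (byte_stream : List Int) (num_bits : Int) (out : List String) : Prop := ¬ D_bytes_to_bases byte_stream num_bits → out = bytes_to_bases_alt byte_stream num_bits
instance (byte_stream : List Int) (num_bits : Int) (out : List String) : Decidable (Spec_bytes_to_bases byte_stream num_bits out) := by unfold Spec_bytes_to_bases; infer_instance

def pvDiffWitness_bytes_to_bases : List Int × Int := ([1], 0)
def pvDiffWitnessOut_bytes_to_bases : (List String) × (List String) :=
  (["Z", "Z", "Z", "Z", "Z", "Z", "Z", "X"], [])

-- ===== CLAIM (what is proved, stated in full; the proofs are below) =====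
def Claim_unchanged_bytes_to_bases : Prop := ∀ (byte_stream : List Int) (num_bits : Int), Dom_bytes_to_bases byte_stream num_bits → Pre_bytes_to_bases byte_stream num_bits → Spec_bytes_to_bases byte_stream num_bits (bytes_to_bases byte_stream num_bits)
def Claim_changed_bytes_to_bases : Prop := Dom_bytes_to_bases (pvDiffWitness_bytes_to_bases.1) (pvDiffWitness_bytes_to_bases.2) ∧ Pre_bytes_to_bases (pvDiffWitness_bytes_to_bases.1) (pvDiffWitness_bytes_to_bases.2) ∧ D_bytes_to_bases (pvDiffWitness_bytes_to_bases.1) (pvDiffWitness_bytes_to_bases.2) ∧ bytes_to_bases (pvDiffWitness_bytes_to_bases.1) (pvDiffWitness_bytes_to_bases.2) = pvDiffWitnessOut_bytes_to_bases.1 ∧ bytes_to_bases_alt (pvDiffWitness_bytes_to_bases.1) (pvDiffWitness_bytes_to_bases.2) = pvDiffWitnessOut_bytes_to_bases.2 ∧ pvDiffWitnessOut_bytes_to_bases.1 ≠ pvDiffWitnessOut_bytes_to_bases.2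
def Claim_exact_bytes_to_bases : Prop := ∀ (byte_stream : List Int) (num_bits : Int), Dom_bytes_to_bases byte_stream num_bits → Pre_bytes_to_bases byte_stream num_bits → D_bytes_to_bases byte_stream num_bits → bytes_to_bases byte_stream num_bits ≠ bytes_to_bases_alt byte_stream num_bits

-- ===== LEMMAS AND PROOFS =====

-- A's per-byte bit list (what the inner loop appends when it never breaks)
def pvByteBitsA (byte : Int) : List Int := (List.range 8).map (pvBitA byte)

lemma length_pvByteBitsA (byte : Int) : (pvByteBitsA byte).length = 8 := by
  simp [pvByteBitsA]

lemma pvFold_frozen (b n : Int) (l : List Nat) (st : List Int × Bool) (h : st.2 = true) :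
    l.foldl (pvInnerStep b n) st = st := by
  induction l with
  | nil => rfl
  | cons i t ih => simp [List.foldl_cons, pvInnerStep, h, ih]

lemma pvFold_lt (b n : Int) : ∀ (l : List Nat) (bits : List Int), (bits.length : Int) < n →
    (l.foldl (pvInnerStep b n) (bits, false)).1
      = bits ++ (l.map (pvBitA b)).take (n - (bits.length : Int)).toNat := by
  intro l
  induction l with
  | nil => intro bits h; simp
  | cons i t ih =>
    intro bits h
    rw [List.foldl_cons]
    by_cases he : ((bits.length : Int) + 1) = n
    · have hstep : pvInnerStep b n (bits, false) i = (bits ++ [pvBitA b i], true) := by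
        simp [pvInnerStep]
        omega
      rw [hstep, pvFold_frozen b n t _ rfl]
      have h1 : (n - (bits.length : Int)).toNat = 1 := by omega
      simp [h1]
    · have hstep : pvInnerStep b n (bits, false) i = (bits ++ [pvBitA b i], false) := by
        simp [pvInnerStep]
        omega
      rw [hstep, ih _ (by simp; omega)]
      have h1 : (n - (bits.length : Int)).toNat = (n - ((bits ++ [pvBitA b i]).length : Int)).toNat + 1 := by
        simp; omega
      simp [h1, List.take_succ_cons, List.append_assoc]

lemma pvFold_ge (b n : Int) : ∀ (l : List Nat) (bits : List Int), n ≤ (bits.length : Int) →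
    l.foldl (pvInnerStep b n) (bits, false) = (bits ++ l.map (pvBitA b), false) := by
  intro l
  induction l with
  | nil => intro bits _; simp
  | cons i t ih =>
    intro bits h
    rw [List.foldl_cons]
    have hstep : pvInnerStep b n (bits, false) i = (bits ++ [pvBitA b i], false) := by
      simp [pvInnerStep]
      omega
    rw [hstep, ih _ (by simp; omega)]
    simp

lemma pvOuter_le0 (n : Int) : ∀ (s bits : List Int), n ≤ (bits.length : Int) →
    pvOuter n bits s = bits ++ s.flatMap pvByteBitsA := by
  intro s
  induction s with
  | nil => intro bits _; simp [pvOuter]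
  | cons b rest ih =>
    intro bits h
    have hinner : (pvInner b n bits).1 = bits ++ pvByteBitsA b := by
      rw [pvInner, pvFold_ge b n _ _ h]; rfl
    have hlen : ((bits ++ pvByteBitsA b).length : Int) = bits.length + 8 := by
      simp [length_pvByteBitsA]
    rw [pvOuter, hinner]
    rw [if_neg (by omega), ih _ (by omega)]
    simp

lemma pvOuter_lt (n : Int) : ∀ (s bits : List Int), (bits.length : Int) < n →
    pvOuter n bits s = bits ++ (s.flatMap pvByteBitsA).take (n - (bits.length : Int)).toNat := by
  intro s
  induction s with
  | nil => intro bits _; simp [pvOuter]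
  | cons b rest ih =>
    intro bits h
    have hinner : (pvInner b n bits).1
        = bits ++ (pvByteBitsA b).take (n - (bits.length : Int)).toNat := by
      rw [pvInner, pvFold_lt b n _ _ h]; rfl
    have hlen : ((bits ++ (pvByteBitsA b).take (n - (bits.length : Int)).toNat).length : Int)
        = bits.length + min (n - (bits.length : Int)).toNat 8 := by
      simp [length_pvByteBitsA]
    rw [pvOuter, hinner]
    rw [List.flatMap_cons, List.take_append]
    by_cases hb : ((bits ++ (pvByteBitsA b).take (n - (bits.length : Int)).toNat).length : Int) = n
    · rw [if_pos hb]
      have h8 : (n - (bits.length : Int)).toNat ≤ 8 := by omega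
      have : ((n - (bits.length : Int)).toNat - (pvByteBitsA b).length) = 0 := by
        rw [length_pvByteBitsA]; omega
      rw [this, List.take_zero, List.append_nil]
    · rw [if_neg hb]
      have h8 : 8 ≤ (n - (bits.length : Int)).toNat := by omega
      have htk : (pvByteBitsA b).take (n - (bits.length : Int)).toNat = pvByteBitsA b := by
        apply List.take_of_length_le; rw [length_pvByteBitsA]; omega
      have hlt : ((bits ++ (pvByteBitsA b).take (n - (bits.length : Int)).toNat).length : Int) < n := by
        omega
      rw [ih _ hlt, htk]
      have : (n - ((bits ++ pvByteBitsA b).length : Int)).toNat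
          = (n - (bits.length : Int)).toNat - (pvByteBitsA b).length := by
        simp [length_pvByteBitsA]; omega
      rw [this, List.append_assoc]

lemma length_flatMap_bits (s : List Int) : (s.flatMap pvByteBitsA).length = 8 * s.length := by
  induction s with
  | nil => simp
  | cons b rest ih =>
    simp [List.flatMap_cons, length_pvByteBitsA, ih]; ring

-- indexing the concatenated bit list = index arithmetic on (j / 8, j % 8)
lemma flat_get (s : List Int) : ∀ k : Nat, k < 8 * s.length →
    (s.flatMap pvByteBitsA)[k]? = some (pvBitA (s.getD (k / 8) 0) (k % 8)) := by
  induction s with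
  | nil => intro k h; simp at h
  | cons b rest ih =>
    intro k h
    rw [List.flatMap_cons]
    by_cases hk : k < 8
    · rw [List.getElem?_append_left (by rw [length_pvByteBitsA]; omega)]
      have hq : k / 8 = 0 := by omega
      have hr : k % 8 = k := by omega
      simp [pvByteBitsA, hq, hr, List.getElem?_range hk]
    · rw [List.getElem?_append_right (by rw [length_pvByteBitsA]; omega)]
      rw [length_pvByteBitsA]
      have h' : k - 8 < 8 * rest.length := by simp at h; omega
      rw [ih (k - 8) h']
      have hq : (k - 8) / 8 = k / 8 - 1 := by omega
      have hq1 : 1 ≤ k / 8 := by omega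
      have hr : (k - 8) % 8 = k % 8 := by omega
      rw [hq, hr]
      cases hkq : k / 8 with
      | zero => omega
      | succ m => simp

-- B computes exactly the first num_bits labels of the concatenated bit list
lemma alt_eq (s : List Int) (n : Int) (hn : 0 ≤ n) :
    bytes_to_bases_alt s n
      = ((s.flatMap pvByteBitsA).take n.toNat).map (fun bit => if bit = 0 then "Z" else "X") := by
  unfold bytes_to_bases_alt
  simp only [PySem.List.pyRange_one, List.map_map]
  apply List.ext_getElem?
  intro k
  by_cases hk : k < (min n (8 * (s.length : Int))).toNat
  · have hk8 : k < 8 * s.length := by omega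
    have hkn : k < n.toNat := by omega
    rw [List.getElem?_map, List.getElem?_range (by omega), List.getElem?_map,
        List.getElem?_take, if_pos hkn, flat_get s k hk8]
    simp only [Option.map_some, Function.comp_apply, zero_add]
    have h1 : PySem.Int.floordiv (k : Int) 8 = ((k / 8 : Nat) : Int) :=
      PySem.Int.floordiv_natCast k 8
    have h2 : PySem.Int.mod (k : Int) 8 = ((k % 8 : Nat) : Int) :=
      PySem.Int.mod_natCast k 8
    have h3 : ((7 : Int) - ((k % 8 : Nat) : Int)).toNat = 7 - k % 8 := by omega
    have h4 : PySem.List.pyGetD s ((k / 8 : Nat) : Int) 0 = s.getD (k / 8) 0 :=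
      PySem.List.pyGetD_natCast s (k / 8) 0
    rw [h1, h2, h3, h4, pvBitA]
  · rw [List.getElem?_map, List.getElem?_eq_none (by simp; omega),
        List.getElem?_eq_none
          (by rw [List.length_map, List.length_take, length_flatMap_bits]; omega)]
    simp

-- ===== VERDICT (by name: the statement is the Claim_ definition above) =====
theorem bytes_to_bases_spec : Claim_unchanged_bytes_to_bases := by
  intro s n _ hpre hnd
  have hpre : 0 ≤ n := hpre
  rcases not_and_or.mp (by unfold D_bytes_to_bases at hnd; exact hnd) with hn | hs
  · -- 0 < n
    have hn : 0 < n := by omega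
    have hbits : pvOuter n [] s = List.take n.toNat (s.flatMap pvByteBitsA) := by
      rw [pvOuter_lt n s [] (by simp; omega)]; simp
    rw [alt_eq s n hpre]
    simp [bytes_to_bases, hbits]
  · -- empty stream
    have hs : s = [] := by simpa using hs
    subst hs
    rw [alt_eq [] n hpre]
    simp [bytes_to_bases, pvOuter]

theorem bytes_to_bases_changed : Claim_changed_bytes_to_bases := by
  unfold Claim_changed_bytes_to_bases; decide

theorem bytes_to_bases_tight : Claim_exact_bytes_to_bases := by
  intro s n _ hpre hd
  rcases hd with ⟨hn, hs⟩
  subst hn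
  have hslen : 0 < s.length := List.length_pos_iff.mpr hs
  have hB : (bytes_to_bases_alt s 0).length = 0 := by
    rw [alt_eq s 0 le_rfl]; simp
  have hA : (bytes_to_bases s 0).length = 8 * s.length := by
    simp only [bytes_to_bases]
    rw [pvOuter_le0 0 s [] (by simp), List.nil_append,
        List.length_map, length_flatMap_bits]
  intro h
  rw [h, hB] at hA
  omega
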